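-- pv_equiv track=rewrite | github.com/darthskyy/MORPH_PARSE | from_scratch/common.py | split_sentences_embedded_sep
-- ===== SOURCE A (Python) =====
-- WORD_SEP_TEXT = "<?word_sep?>"
--
-- def split_sentences_embedded_sep(sentence):
--     """Split the corpus into sentences, separating by adding '^' to the morpheme that begins each word"""
--     morphemes, tags = sentence[0], sentence[1]
--
--     morphemes_new = []
--     tags_new = []
--
--     is_start = True
--     for morpheme, tag in zip(morphemes, tags):
--         if morpheme == WORD_SEP_TEXT:
--             is_start = True
--             continue
--
--         if is_start:
--             morphemes_new.append("^" + morpheme)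
--             is_start = False
--         else:
--             morphemes_new.append(morpheme)
--
--         tags_new.append(tag)
--
--     yield morphemes_new, tags_new
-- ===== SOURCE B (Python) =====
-- WORD_SEP_TEXT = "<?word_sep?>"
--
-- def split_sentences_embedded_sep(sentence):
--     """Split the corpus into sentences, separating by adding '^' to the morpheme that begins each word"""
--     pairs = list(zip(sentence[0], sentence[1]))
--     morphemes_new = []
--     tags_new = []
--
--     i, n = 0, len(pairs)
--     while i < n:
--         # extend the run of items whose separator-ness matches pairs[i]
--         j = i
--         while j < n and (pairs[j][0] == WORD_SEP_TEXT) == (pairs[i][0] == WORD_SEP_TEXT):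
--             j += 1
--         if pairs[i][0] != WORD_SEP_TEXT:
--             group = pairs[i:j]
--             morphemes_new.append("^" + group[0][0])
--             morphemes_new.extend(m for m, _ in group[1:])
--             tags_new.extend(t for _, t in group)
--         i = j
--
--     yield morphemes_new, tags_new
-- ===== Notes on version B (the rewrite author's own statement) =====
-- stated objective: alternative
-- what changed: Replaces A's per-item scan with an is_start flag by a two-level grouping scan: partition the zipped stream into maximal runs of separators vs word morphemes, drop separator runs, and mark only the head of each word run with '^'.
import Mathlib
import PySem

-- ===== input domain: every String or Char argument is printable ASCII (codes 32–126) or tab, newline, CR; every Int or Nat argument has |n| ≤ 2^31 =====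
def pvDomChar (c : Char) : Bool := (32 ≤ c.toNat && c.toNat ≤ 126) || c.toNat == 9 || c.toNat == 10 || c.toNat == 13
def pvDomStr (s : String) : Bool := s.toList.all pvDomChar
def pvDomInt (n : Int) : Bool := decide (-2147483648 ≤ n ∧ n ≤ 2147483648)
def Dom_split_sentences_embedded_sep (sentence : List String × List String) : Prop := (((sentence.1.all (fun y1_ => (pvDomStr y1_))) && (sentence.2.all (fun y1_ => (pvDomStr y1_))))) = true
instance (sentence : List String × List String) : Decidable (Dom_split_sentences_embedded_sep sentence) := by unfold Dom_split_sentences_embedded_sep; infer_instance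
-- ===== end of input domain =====

-- B replaces A's per-item state-flag scan by a grouping pass (runs of separators /
-- runs of word morphemes), marking only the head of each word run; same output, alternative decomposition.

def pvWordSep : String := "<?word_sep?>"

-- ===== PORT A =====
-- A's single loop over zip(morphemes, tags) with the is_start flag, transliterated as a foldl.
def split_sentences_embedded_sep (sentence : List String × List String) : List (List String × List String) :=
  let morphemes := sentence.1
  let tags := sentence.2
  let st := (morphemes.zip tags).foldl
    (fun (acc : List String × List String × Bool) mt =>
      let ms := acc.1; let ts := acc.2.1; let isStart := acc.2.2
      if mt.1 = pvWordSep then (ms, ts, true)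
      else if isStart then (ms ++ ["^" ++ mt.1], ts ++ [mt.2], false)
      else (ms ++ [mt.1], ts ++ [mt.2], false))
    ([], [], true)
  [(st.1, st.2.1)]

-- ===== PORT B =====
-- Source B's inner while-loop: the maximal run of pairs with the same separator-ness as the head.
def pvGroups : List (String × String) → List (List (String × String))
  | [] => []
  | x :: xs =>
    (x :: xs.takeWhile (fun y => (y.1 == pvWordSep) == (x.1 == pvWordSep)))
      :: pvGroups (xs.dropWhile (fun y => (y.1 == pvWordSep) == (x.1 == pvWordSep)))
  termination_by l => l.length
  decreasing_by simpa using Nat.lt_succ_of_le (List.length_dropWhile_le _ _)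

def split_sentences_embedded_sep_alt (sentence : List String × List String) : List (List String × List String) :=
  let pairs := sentence.1.zip sentence.2
  let st := (pvGroups pairs).foldl
    (fun (acc : List String × List String) g =>
      match g with
      | [] => acc
      | (m, _) :: rest =>
        if m = pvWordSep then acc
        else (acc.1 ++ ("^" ++ m) :: rest.map Prod.fst, acc.2 ++ g.map Prod.snd))
    ([], [])
  [st]

-- ===== PRECONDITION & SPEC =====
def Spec_split_sentences_embedded_sep (sentence : List String × List String) (out : List (List String × List String)) : Prop := out = split_sentences_embedded_sep_alt sentence
instance (sentence : List String × List String) (out : List (List String × List String)) : Decidable (Spec_split_sentences_embedded_sep sentence out) := by unfold Spec_split_sentences_embedded_sep; infer_instance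

-- ===== CLAIM (what is proved, stated in full; the proofs are below) =====
def Claim_equal_split_sentences_embedded_sep : Prop := ∀ (sentence : List String × List String), Dom_split_sentences_embedded_sep sentence → Spec_split_sentences_embedded_sep sentence (split_sentences_embedded_sep sentence)

-- ===== LEMMAS AND PROOFS =====

-- Clean cons-building recursion equivalent to A's foldl.
def recA : List (String × String) → Bool → List String × List String
  | [], _ => ([], [])
  | (m, t) :: rest, s =>
    if m = pvWordSep then recA rest true
    else
      let r := recA rest false
      ((if s then "^" ++ m else m) :: r.1, t :: r.2)

-- Clean cons-building recursion equivalent to B's foldl over groups.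
def recB : List (List (String × String)) → List String × List String
  | [] => ([], [])
  | [] :: gs => recB gs
  | ((m, t) :: rest) :: gs =>
    if m = pvWordSep then recB gs
    else
      let r := recB gs
      (("^" ++ m) :: (rest.map Prod.fst ++ r.1), (t :: rest.map Prod.snd) ++ r.2)

theorem foldA_eq (zl : List (String × String)) (ms ts : List String) (s : Bool) :
    (zl.foldl (fun (acc : List String × List String × Bool) mt =>
      let ms := acc.1; let ts := acc.2.1; let isStart := acc.2.2
      if mt.1 = pvWordSep then (ms, ts, true)
      else if isStart then (ms ++ ["^" ++ mt.1], ts ++ [mt.2], false)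
      else (ms ++ [mt.1], ts ++ [mt.2], false)) (ms, ts, s)).1
      = ms ++ (recA zl s).1 ∧
    (zl.foldl (fun (acc : List String × List String × Bool) mt =>
      let ms := acc.1; let ts := acc.2.1; let isStart := acc.2.2
      if mt.1 = pvWordSep then (ms, ts, true)
      else if isStart then (ms ++ ["^" ++ mt.1], ts ++ [mt.2], false)
      else (ms ++ [mt.1], ts ++ [mt.2], false)) (ms, ts, s)).2.1
      = ts ++ (recA zl s).2 := by
  induction zl generalizing ms ts s with
  | nil => simp [recA]
  | cons x xs ih =>
    obtain ⟨m, t⟩ := x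
    by_cases h : m = pvWordSep
    · simp [recA, h, ih]
    · cases s <;> simp [recA, h, ih]

theorem foldB_eq (gs : List (List (String × String))) (ms ts : List String) :
    gs.foldl (fun (acc : List String × List String) g =>
      match g with
      | [] => acc
      | (m, _) :: rest =>
        if m = pvWordSep then acc
        else (acc.1 ++ ("^" ++ m) :: rest.map Prod.fst, acc.2 ++ g.map Prod.snd)) (ms, ts)
      = (ms ++ (recB gs).1, ts ++ (recB gs).2) := by
  induction gs generalizing ms ts with
  | nil => simp [recB]
  | cons g gs ih =>
    match g with
    | [] => simp [recB, ih]
    | (m, t) :: rest =>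
      by_cases h : m = pvWordSep
      · simp [recB, h, ih]
      · simp [recB, h, ih]

-- a separator item resets the flag, so leading separators vanish under recA … true
theorem recA_sep_prefix (l rest : List (String × String))
    (h : ∀ y ∈ l, y.1 = pvWordSep) : recA (l ++ rest) true = recA rest true := by
  induction l with
  | nil => rfl
  | cons x xs ih =>
    have hx := h x (by simp)
    simp only [List.cons_append, recA, hx]
    exact ih (fun y hy => h y (by simp [hy]))

-- a run of non-separator items with the flag down is copied verbatim
theorem recA_word_run (l rest : List (String × String))
    (h : ∀ y ∈ l, y.1 ≠ pvWordSep) :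
    recA (l ++ rest) false
      = (l.map Prod.fst ++ (recA rest false).1, l.map Prod.snd ++ (recA rest false).2) := by
  induction l with
  | nil => simp
  | cons x xs ih =>
    obtain ⟨m, t⟩ := x
    have hx : m ≠ pvWordSep := h (m, t) (by simp)
    simp [recA, hx, ih (fun y hy => h y (by simp [hy]))]

-- when the remainder is empty or starts with a separator, the incoming flag is irrelevant
theorem recA_flag_irrel (l : List (String × String))
    (h : l = [] ∨ ∃ y ys, l = y :: ys ∧ y.1 = pvWordSep) :
    recA l false = recA l true := by
  rcases h with h | ⟨y, ys, rfl, hy⟩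
  · subst h; rfl
  · obtain ⟨m, t⟩ := y
    simp_all [recA]

theorem recA_eq_recB (zl : List (String × String)) :
    recA zl true = recB (pvGroups zl) := by
  induction zl using pvGroups.induct with
  | case1 => simp [recA, pvGroups, recB]
  | case2 x xs ih =>
    obtain ⟨m, t⟩ := x
    set p : String × String → Bool := fun y => (y.1 == pvWordSep) == ((m, t).1 == pvWordSep) with hp
    have hsplit : xs.takeWhile p ++ xs.dropWhile p = xs := List.takeWhile_append_dropWhile
    have hdrop : xs.dropWhile p = [] ∨ ∃ y ys, xs.dropWhile p = y :: ys ∧ p y = false := by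
      cases hd : xs.dropWhile p with
      | nil => exact Or.inl rfl
      | cons y ys =>
        refine Or.inr ⟨y, ys, rfl, ?_⟩
        have := List.head_dropWhile_not p (l := xs) (by simp [hd])
        simpa [hd] using this
    by_cases h : m = pvWordSep
    · -- separator run: everything in the run is a separator
      have htk : ∀ y ∈ xs.takeWhile p, y.1 = pvWordSep := by
        intro y hy
        have := List.mem_takeWhile_imp hy  -- p y = true
        simpa [hp, h] using this
      have hstep : recA ((m, t) :: xs) true = recA (xs.dropWhile p) true := by
        conv_lhs => rw [show (m, t) :: xs = ((m, t) :: xs.takeWhile p) ++ xs.dropWhile p by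
          simp [hsplit]]
        exact recA_sep_prefix _ _ (by
          intro y hy
          rcases List.mem_cons.mp hy with rfl | hy
          · exact h
          · exact htk y hy)
      rw [hstep, ih, pvGroups]
      simp [recB, hp, h]
    · -- word run
      have htk : ∀ y ∈ xs.takeWhile p, y.1 ≠ pvWordSep := by
        intro y hy
        have := List.mem_takeWhile_imp hy
        simpa [hp, h] using this
      have hflag : recA (xs.dropWhile p) false = recA (xs.dropWhile p) true := by
        apply recA_flag_irrel
        rcases hdrop with hnil | ⟨y, ys, hys, hyp⟩
        · exact Or.inl hnil
        · refine Or.inr ⟨y, ys, hys, ?_⟩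
          by_contra hne
          simp [hp, h, hne] at hyp
      have : recA ((m, t) :: xs) true
          = (("^" ++ m) :: (recA (xs.takeWhile p ++ xs.dropWhile p) false).1,
             t :: (recA (xs.takeWhile p ++ xs.dropWhile p) false).2) := by
        simp [recA, h, hsplit]
      rw [this, recA_word_run _ _ htk, hflag, ih, pvGroups]
      simp [recB, hp, h]

-- ===== VERDICT (by name: the statement is the Claim_ definition above) =====
theorem split_sentences_embedded_sep_spec : Claim_equal_split_sentences_embedded_sep := by
  intro sentence _
  unfold Spec_split_sentences_embedded_sep split_sentences_embedded_sep split_sentences_embedded_sep_alt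
  have hA := foldA_eq (sentence.1.zip sentence.2) [] [] true
  have hB := foldB_eq (pvGroups (sentence.1.zip sentence.2)) [] []
  simp only [List.nil_append] at hA hB
  simp [hA.1, hA.2, hB, recA_eq_recB]
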